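-- pv_equiv track=rewrite | github.com/Ties020/Projects | Python/Image of symbol classifier/Results/prproject.py | tokenize_label
-- ===== SOURCE A (Python) =====
-- def tokenize_label(label):
--     tokens = []
--     i = 0
--     # Loop through label
--     while i < len(label):
--         char = label[i]
--         # If symbol is part of a Latex command, collect all parts of the command
--         if char == "\\":
--             i += 1
--             collectchar = char
--             while i < len(label) and label[i] != "{" and label[i] != " ":
--                 collectchar += label[i]
--                 i += 1
--             tokens.append(collectchar)
--         # Else, append symbol to the token list
--         else:
--             if char != " ":
--                 tokens.append(char)
--             i += 1
--     return tokens
-- ===== SOURCE B (Python) =====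
-- def tokenize_label(label):
--     tokens = []
--     cmd = None  # LaTeX command currently being collected, if any
--     for ch in label:
--         if cmd is not None and ch != '{' and ch != ' ':
--             cmd += ch
--         else:
--             if cmd is not None:
--                 tokens.append(cmd)
--                 cmd = None
--             if ch == '\\':
--                 cmd = '\\'
--             elif ch != ' ':
--                 tokens.append(ch)
--     if cmd is not None:
--         tokens.append(cmd)
--     return tokens
-- ===== Notes on version B (the rewrite author's own statement) =====
-- stated objective: alternative
-- what changed: Replaced A's index-based outer while loop with a nested char-collecting inner while by a single for-each pass over the characters driving a two-state machine (current command or None), flushing the pending command token when a terminator arrives.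
import Mathlib
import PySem

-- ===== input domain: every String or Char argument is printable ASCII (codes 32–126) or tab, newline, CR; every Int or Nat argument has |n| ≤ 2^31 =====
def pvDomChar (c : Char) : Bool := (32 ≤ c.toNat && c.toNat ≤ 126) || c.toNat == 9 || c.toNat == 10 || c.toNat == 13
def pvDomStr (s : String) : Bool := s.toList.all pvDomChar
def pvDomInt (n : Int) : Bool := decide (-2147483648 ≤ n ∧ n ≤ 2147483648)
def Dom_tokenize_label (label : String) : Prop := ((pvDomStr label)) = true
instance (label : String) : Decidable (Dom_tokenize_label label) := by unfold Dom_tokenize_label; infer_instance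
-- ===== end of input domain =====

-- B replaces A's index-driven nested while loops by a one-pass state-machine fold; same O(n) cost, different structure.

-- ===== PORT A =====
-- inner while: collect command characters until '{' or ' ' (or end)
def pvCollectA (cs : List Char) (acc : String) : String × List Char :=
  match cs with
  | [] => (acc, [])
  | c :: cs' => if c ≠ '{' ∧ c ≠ ' ' then pvCollectA cs' (acc.push c) else (acc, c :: cs')

theorem pvCollectA_len (cs : List Char) (acc : String) :
    (pvCollectA cs acc).2.length ≤ cs.length := by
  induction cs generalizing acc with
  | nil => simp [pvCollectA]
  | cons c cs' ih =>
    simp only [pvCollectA]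
    split
    · exact le_trans (ih _) (Nat.le_succ _)
    · simp

-- outer while loop of A, as recursion on the remaining characters
def pvTokA : List Char → List String
  | [] => []
  | c :: rest =>
    if c = '\\' then
      let p := pvCollectA rest "\\"
      p.1 :: pvTokA p.2
    else if c ≠ ' ' then String.mk [c] :: pvTokA rest
    else pvTokA rest
termination_by cs => cs.length
decreasing_by
  · exact Nat.lt_succ_of_le (pvCollectA_len rest "\\")
  · simp
  · simp

def tokenize_label (label : String) : List String := pvTokA label.toList

-- ===== PORT B =====
-- one step of the state machine: state = (tokens so far, pending command or none)
def pvStepB (st : List String × Option String) (ch : Char) : List String × Option String :=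
  match st.2 with
  | some cmd =>
    if ch ≠ '{' ∧ ch ≠ ' ' then (st.1, some (cmd.push ch))
    else if ch = '\\' then (st.1 ++ [cmd], some "\\")
    else if ch ≠ ' ' then (st.1 ++ [cmd, String.mk [ch]], none)
    else (st.1 ++ [cmd], none)
  | none =>
    if ch = '\\' then (st.1, some "\\")
    else if ch ≠ ' ' then (st.1 ++ [String.mk [ch]], none)
    else (st.1, none)

def tokenize_label_alt (label : String) : List String :=
  let st := label.toList.foldl pvStepB ([], none)
  st.1 ++ (match st.2 with | some cmd => [cmd] | none => [])

-- ===== PRECONDITION & SPEC =====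
def Spec_tokenize_label (label : String) (out : List String) : Prop := out = tokenize_label_alt label
instance (label : String) (out : List String) : Decidable (Spec_tokenize_label label out) := by unfold Spec_tokenize_label; infer_instance

-- ===== CLAIM (what is proved, stated in full; the proofs are below) =====
def Claim_equal_tokenize_label : Prop := ∀ (label : String), Dom_tokenize_label label → Spec_tokenize_label label (tokenize_label label)

-- ===== LEMMAS AND PROOFS =====
def pvFinish (st : List String × Option String) : List String :=
  st.1 ++ (match st.2 with | some cmd => [cmd] | none => [])

theorem tokA_bs (rest : List Char) :
    pvTokA ('\\' :: rest) = (pvCollectA rest "\\").1 :: pvTokA (pvCollectA rest "\\").2 := by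
  simp [pvTokA]

theorem tokA_other (c : Char) (rest : List Char) (hb : c ≠ '\\') (hs : c ≠ ' ') :
    pvTokA (c :: rest) = String.mk [c] :: pvTokA rest := by
  simp [pvTokA, hb, hs]

theorem tokA_space (rest : List Char) : pvTokA (' ' :: rest) = pvTokA rest := by
  simp [pvTokA]

theorem collectA_go (c : Char) (rest : List Char) (cmd : String) (h : c ≠ '{' ∧ c ≠ ' ') :
    pvCollectA (c :: rest) cmd = pvCollectA rest (cmd.push c) := by
  simp [pvCollectA, h]

theorem collectA_stop (c : Char) (rest : List Char) (cmd : String) (h : ¬ (c ≠ '{' ∧ c ≠ ' ')) :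
    pvCollectA (c :: rest) cmd = (cmd, c :: rest) := by
  simp only [pvCollectA, if_neg h]

theorem pvKey (cs : List Char) :
    (∀ toks, pvFinish (cs.foldl pvStepB (toks, none)) = toks ++ pvTokA cs) ∧
    (∀ toks cmd, pvFinish (cs.foldl pvStepB (toks, some cmd)) =
      toks ++ (pvCollectA cs cmd).1 :: pvTokA (pvCollectA cs cmd).2) := by
  induction cs with
  | nil => simp [pvFinish, pvTokA, pvCollectA]
  | cons c rest ih =>
    constructor
    · intro toks
      by_cases hb : c = '\\'
      · subst hb
        simp only [List.foldl_cons, pvStepB, if_true]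
        rw [ih.2, tokA_bs]
      · by_cases hs : c = ' '
        · subst hs
          simp only [List.foldl_cons, pvStepB]
          rw [if_neg (by decide), if_neg (by simp), ih.1, tokA_space]
        · simp only [List.foldl_cons, pvStepB]
          rw [if_neg hb, if_pos hs, ih.1, tokA_other c rest hb hs]
          simp
    · intro toks cmd
      by_cases hgo : c ≠ '{' ∧ c ≠ ' '
      · simp only [List.foldl_cons, pvStepB, if_pos hgo]
        rw [ih.2, collectA_go c rest cmd hgo]
      · have hstop : c = '{' ∨ c = ' ' := by
          by_cases h1 : c = '{'
          · exact Or.inl h1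
          · exact Or.inr (by by_contra h2; exact hgo ⟨h1, h2⟩)
        rw [collectA_stop c rest cmd hgo]
        simp only [List.foldl_cons, pvStepB, if_neg hgo]
        rcases hstop with h | h
        · subst h
          rw [if_neg (by decide), if_pos (by decide), ih.1,
            tokA_other '{' rest (by decide) (by decide)]
          simp
        · subst h
          rw [if_neg (by decide), if_neg (by simp), ih.1, tokA_space]
          simp

-- ===== VERDICT (by name: the statement is the Claim_ definition above) =====
theorem tokenize_label_spec : Claim_equal_tokenize_label := by
  intro label _
  unfold Spec_tokenize_label tokenize_label tokenize_label_alt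
  have h := (pvKey label.toList).1 []
  simpa [pvFinish] using h.symm
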